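-- pv_equiv track=rewrite | github.com/BardOfCodes/messy_coref | CSG/env/shape_assembly/parser.py | get_all_subprograms
-- ===== SOURCE A (Python) =====
-- def get_all_subprograms(expression_list):
--     sa_programs = []
--     command_list = []
--     for expression in expression_list:
--         if "cuboid(" in expression:
--             # remove the 1)?
--             expression = expression[:-2] + "0)"
--             command_list.append(expression)
--         elif "attach(" in expression:
--             command_list.append(expression)
--         elif "reflect(" in expression:
--             command_list.append(expression)
--         elif "translate(" in expression:
--             command_list.append(expression)
--         elif "squeeze(" in expression:
--             command_list.append(expression)
--         elif expression == "$$":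
--             command_list.append(expression)
--             sa_programs.append(command_list)
--             # the program has ended.
--             command_list = []
--         elif expression == "$":
--             command_list.append("$$")
--             sa_programs.append(command_list)
--             # the program has ended.
--             command_list = []
--     return sa_programs
-- ===== SOURCE B (Python) =====
-- def get_all_subprograms(expression_list):
--     # Traverse RIGHT-TO-LEFT building groups back-to-front: a terminator opens a
--     # new group; a command joins the most recently opened group, or is dropped if
--     # no terminator has been seen yet (this discards the dangling tail for free).
--     groups_rev = []  # groups in reverse order, each group's commands in reverse order
--     for e in reversed(expression_list):
--         if e == "$$" or e == "$":
--             groups_rev.append(["$$"])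
--         elif groups_rev:
--             if "cuboid(" in e:
--                 groups_rev[-1].append(e[:-2] + "0)")
--             elif ("attach(" in e or "reflect(" in e
--                   or "translate(" in e or "squeeze(" in e):
--                 groups_rev[-1].append(e)
--     return [list(reversed(g)) for g in reversed(groups_rev)]
-- ===== Notes on version B (the rewrite author's own statement) =====
-- stated objective: alternative
-- what changed: Replaces A's forward loop with a pending-commands buffer flushed at each terminator by a right-to-left traversal that builds the groups back-to-front: a terminator opens a new group, each command is appended to the most recently opened group (or dropped when none exists, discarding the dangling tail without flush bookkeeping; appends avoid A's per-group list reallocation pattern), and the nested reversals are undone once at the end.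
import Mathlib
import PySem

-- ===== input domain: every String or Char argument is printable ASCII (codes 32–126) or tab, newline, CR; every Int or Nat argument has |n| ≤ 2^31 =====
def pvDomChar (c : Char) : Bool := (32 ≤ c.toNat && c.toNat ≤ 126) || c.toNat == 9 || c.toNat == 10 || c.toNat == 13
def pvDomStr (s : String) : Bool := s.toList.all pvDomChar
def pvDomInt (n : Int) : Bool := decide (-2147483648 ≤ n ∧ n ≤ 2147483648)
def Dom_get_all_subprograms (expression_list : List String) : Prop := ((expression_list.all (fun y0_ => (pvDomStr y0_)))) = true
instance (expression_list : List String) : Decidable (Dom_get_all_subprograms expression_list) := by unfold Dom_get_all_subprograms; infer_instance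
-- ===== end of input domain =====

-- B traverses the list RIGHT-TO-LEFT building the groups back-to-front (a terminator
-- opens a group, commands join the most recently opened group or are dropped if none
-- exists), instead of A's forward loop with a buffer flushed at each terminator;
-- same cost, objective: alternative.

-- shared helper: the cuboid rewrite expression[:-2] + "0)"
def pvCub (e : String) : String :=
  String.ofList (PySem.Chars.slice e.toList none (some (-2)) ++ ['0', ')'])

-- ===== PORT A =====
-- A's loop over expression_list with state (sa_programs, command_list), branch for branch.
def get_all_subprograms_go (sa : List (List String)) (cl : List String) :
    List String → List (List String)
  | [] => sa
  | e :: rest =>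
    if PySem.Str.isIn "cuboid(" e then
      -- expression = expression[:-2] + "0)"
      get_all_subprograms_go sa (cl ++ [pvCub e]) rest
    else if PySem.Str.isIn "attach(" e then
      get_all_subprograms_go sa (cl ++ [e]) rest
    else if PySem.Str.isIn "reflect(" e then
      get_all_subprograms_go sa (cl ++ [e]) rest
    else if PySem.Str.isIn "translate(" e then
      get_all_subprograms_go sa (cl ++ [e]) rest
    else if PySem.Str.isIn "squeeze(" e then
      get_all_subprograms_go sa (cl ++ [e]) rest
    else if e == "$$" then
      get_all_subprograms_go (sa ++ [cl ++ [e]]) [] rest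
    else if e == "$" then
      get_all_subprograms_go (sa ++ [cl ++ ["$$"]]) [] rest
    else
      get_all_subprograms_go sa cl rest

def get_all_subprograms (expression_list : List String) : List (List String) :=
  get_all_subprograms_go [] [] expression_list

-- ===== PORT B =====
-- one step of B's loop over the reversed list; gr = groups in reverse order,
-- each group's commands in reverse order
def bStep (gr : List (List String)) (e : String) : List (List String) :=
  if e == "$$" || e == "$" then
    gr ++ [["$$"]]
  else if gr.isEmpty then gr
  else if PySem.Str.isIn "cuboid(" e then
    gr.dropLast ++ [gr.getLastD [] ++ [pvCub e]]
  else if PySem.Str.isIn "attach(" e || PySem.Str.isIn "reflect(" e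
       || PySem.Str.isIn "translate(" e || PySem.Str.isIn "squeeze(" e then
    gr.dropLast ++ [gr.getLastD [] ++ [e]]
  else gr

def get_all_subprograms_alt (expression_list : List String) : List (List String) :=
  ((expression_list.reverse.foldl bStep []).reverse).map List.reverse

-- ===== PRECONDITION & SPEC =====
def Spec_get_all_subprograms (expression_list : List String) (out : List (List String)) : Prop := out = get_all_subprograms_alt expression_list
instance (expression_list : List String) (out : List (List String)) : Decidable (Spec_get_all_subprograms expression_list out) := by unfold Spec_get_all_subprograms; infer_instance

-- ===== CLAIM (what is proved, stated in full; the proofs are below) =====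
def Claim_equal_get_all_subprograms : Prop := ∀ (expression_list : List String), Dom_get_all_subprograms expression_list → Spec_get_all_subprograms expression_list (get_all_subprograms expression_list)

-- ===== LEMMAS AND PROOFS =====

-- proof-only middle form: normalize one expression (none = dropped) …
def pvNorm (e : String) : Option String :=
  if PySem.Str.isIn "cuboid(" e then
    some (pvCub e)
  else if PySem.Str.isIn "attach(" e || PySem.Str.isIn "reflect(" e
       || PySem.Str.isIn "translate(" e || PySem.Str.isIn "squeeze(" e then
    some e
  else if e == "$" || e == "$$" then
    some "$$"
  else
    none

-- … and group the normalized stream on the sentinel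
def pvSplit (current : List String) : List String → List (List String)
  | [] => []
  | c :: rest =>
    if c == "$$" then (current ++ [c]) :: pvSplit [] rest
    else pvSplit (current ++ [c]) rest

-- from e matching a keyword that "$$" / "$" do not contain, e is not that terminator
theorem pv_ne_of_isIn {kw e t : String} (hkw : PySem.Str.isIn kw t = false)
    (h : PySem.Str.isIn kw e = true) : (e == t) = false := by
  cases hbe : (e == t) with
  | false => rfl
  | true =>
    have he : e = t := eq_of_beq hbe
    rw [he, hkw] at h
    exact absurd h (by simp)

-- the rewritten cuboid command ends in ')', hence is not the sentinel
theorem pv_cuboid_ne_sentinel (e : String) : (pvCub e == "$$") = false := by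
  cases hbe : (pvCub e == "$$") with
  | false => rfl
  | true =>
    have h : pvCub e = "$$" := eq_of_beq hbe
    have h2 := congrArg String.toList h
    simp only [pvCub, String.toList_ofList] at h2
    have h3 := congrArg List.getLast? h2
    simp at h3

-- a keyword-carrying expression goes through A's append branch and B's keyword branch alike
theorem pv_keep_step (e : String) (rest : List String) (sa : List (List String)) (cl : List String)
    (hp : pvNorm e = some e) (hne : (e == "$$") = false)
    (hgo : get_all_subprograms_go sa cl (e :: rest) = get_all_subprograms_go sa (cl ++ [e]) rest)
    (ih : ∀ (sa : List (List String)) (cl : List String),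
      get_all_subprograms_go sa cl rest = sa ++ pvSplit cl (rest.filterMap pvNorm)) :
    get_all_subprograms_go sa cl (e :: rest) = sa ++ pvSplit cl ((e :: rest).filterMap pvNorm) := by
  rw [hgo, ih, List.filterMap_cons, hp]
  show _ = sa ++ pvSplit cl (e :: rest.filterMap pvNorm)
  rw [pvSplit, if_neg (by rw [hne]; exact Bool.false_ne_true)]

-- loop invariant: A's loop from state (sa, cl) is sa ++ the grouping of the normalized rest
theorem pv_go_eq (l : List String) :
    ∀ (sa : List (List String)) (cl : List String),
      get_all_subprograms_go sa cl l = sa ++ pvSplit cl (l.filterMap pvNorm) := by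
  induction l with
  | nil => intro sa cl; rw [get_all_subprograms_go, List.filterMap_nil, pvSplit, List.append_nil]
  | cons e rest ih =>
    intro sa cl
    by_cases h1 : PySem.Str.isIn "cuboid(" e = true
    · -- cuboid: both sides append the rewritten command, never a sentinel
      have hne := pv_cuboid_ne_sentinel e
      rw [get_all_subprograms_go, if_pos h1, ih, List.filterMap_cons,
        show pvNorm e = some (pvCub e) by rw [pvNorm, if_pos h1]]
      show _ = sa ++ pvSplit cl (_ :: rest.filterMap pvNorm)
      rw [pvSplit, if_neg (by rw [hne]; exact Bool.false_ne_true)]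
    · rw [Bool.not_eq_true] at h1
      by_cases h2 : PySem.Str.isIn "attach(" e = true
      · exact pv_keep_step e rest sa cl
          (by rw [pvNorm, if_neg (by rw [h1]; exact Bool.false_ne_true),
                if_pos (by rw [h2]; rfl)])
          (pv_ne_of_isIn (by decide) h2)
          (by rw [get_all_subprograms_go, if_neg (by rw [h1]; exact Bool.false_ne_true), if_pos h2]) ih
      · rw [Bool.not_eq_true] at h2
        by_cases h3 : PySem.Str.isIn "reflect(" e = true
        · exact pv_keep_step e rest sa cl
            (by rw [pvNorm, if_neg (by rw [h1]; exact Bool.false_ne_true),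
                  if_pos (by rw [h2, h3]; rfl)])
            (pv_ne_of_isIn (by decide) h3)
            (by rw [get_all_subprograms_go, if_neg (by rw [h1]; exact Bool.false_ne_true),
                  if_neg (by rw [h2]; exact Bool.false_ne_true), if_pos h3]) ih
        · rw [Bool.not_eq_true] at h3
          by_cases h4 : PySem.Str.isIn "translate(" e = true
          · exact pv_keep_step e rest sa cl
              (by rw [pvNorm, if_neg (by rw [h1]; exact Bool.false_ne_true),
                    if_pos (by rw [h2, h3, h4]; rfl)])
              (pv_ne_of_isIn (by decide) h4)
              (by rw [get_all_subprograms_go, if_neg (by rw [h1]; exact Bool.false_ne_true),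
                    if_neg (by rw [h2]; exact Bool.false_ne_true),
                    if_neg (by rw [h3]; exact Bool.false_ne_true), if_pos h4]) ih
          · rw [Bool.not_eq_true] at h4
            by_cases h5 : PySem.Str.isIn "squeeze(" e = true
            · exact pv_keep_step e rest sa cl
                (by rw [pvNorm, if_neg (by rw [h1]; exact Bool.false_ne_true),
                      if_pos (by rw [h2, h3, h4, h5]; rfl)])
                (pv_ne_of_isIn (by decide) h5)
                (by rw [get_all_subprograms_go, if_neg (by rw [h1]; exact Bool.false_ne_true),
                      if_neg (by rw [h2]; exact Bool.false_ne_true),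
                      if_neg (by rw [h3]; exact Bool.false_ne_true),
                      if_neg (by rw [h4]; exact Bool.false_ne_true), if_pos h5]) ih
            · rw [Bool.not_eq_true] at h5
              have hA := fun {t : List (List String)} {c : List String} =>
                (by rw [get_all_subprograms_go, if_neg (by rw [h1]; exact Bool.false_ne_true),
                      if_neg (by rw [h2]; exact Bool.false_ne_true),
                      if_neg (by rw [h3]; exact Bool.false_ne_true),
                      if_neg (by rw [h4]; exact Bool.false_ne_true),
                      if_neg (by rw [h5]; exact Bool.false_ne_true)] :
                  get_all_subprograms_go t c (e :: rest) =
                    if e == "$$" then get_all_subprograms_go (t ++ [c ++ [e]]) [] rest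
                    else if e == "$" then get_all_subprograms_go (t ++ [c ++ ["$$"]]) [] rest
                    else get_all_subprograms_go t c rest)
              have hN : pvNorm e =
                  (if e == "$" || e == "$$" then some "$$" else none) := by
                rw [pvNorm, if_neg (by rw [h1]; exact Bool.false_ne_true),
                  if_neg (by rw [h2, h3, h4, h5]; exact Bool.false_ne_true)]
              by_cases h6 : e = "$$"
              · subst h6
                rw [hA, if_pos (by decide), ih, List.filterMap_cons, hN]
                show _ = sa ++ pvSplit cl ("$$" :: rest.filterMap pvNorm)
                rw [pvSplit, if_pos (by decide), List.append_assoc, List.singleton_append]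
              · by_cases h7 : e = "$"
                · subst h7
                  rw [hA, if_neg (by decide), if_pos (by decide), ih, List.filterMap_cons, hN]
                  show _ = sa ++ pvSplit cl ("$$" :: rest.filterMap pvNorm)
                  rw [pvSplit, if_pos (by decide), List.append_assoc, List.singleton_append]
                · have hb7 : (e == "$") = false := beq_eq_false_iff_ne.mpr h7
                  have hb6 : (e == "$$") = false := beq_eq_false_iff_ne.mpr h6
                  rw [hA, if_neg (by rw [hb6]; exact Bool.false_ne_true),
                    if_neg (by rw [hb7]; exact Bool.false_ne_true), ih,
                    List.filterMap_cons, hN,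
                    if_neg (by rw [hb6, hb7]; exact Bool.false_ne_true)]

-- pvSplit with a pending prefix just prepends it to the first group, if any
theorem pvSplit_shift (l : List String) : ∀ (cl : List String),
    pvSplit cl l = (match pvSplit [] l with
      | [] => [] | g :: gs => (cl ++ g) :: gs : List (List String)) := by
  induction l with
  | nil => intro cl; rfl
  | cons c rest ih =>
    intro cl
    by_cases h : (c == "$$") = true
    · rw [pvSplit, if_pos h, pvSplit, if_pos h]
      simp
    · rw [Bool.not_eq_true] at h
      rw [pvSplit, if_neg (by rw [h]; exact Bool.false_ne_true),
        pvSplit, if_neg (by rw [h]; exact Bool.false_ne_true), ih (cl ++ [c]), ih ([] ++ [c])]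
      cases pvSplit [] rest <;> simp

-- a non-sentinel normalized command joins the first group, or vanishes if there is none
theorem pvSplit_cons_cmd (c : String) (L : List String) (hc : (c == "$$") = false) :
    pvSplit [] (c :: L) = (match pvSplit [] L with
      | [] => [] | g :: gs => (c :: g) :: gs : List (List String)) := by
  rw [pvSplit, if_neg (by rw [hc]; exact Bool.false_ne_true), pvSplit_shift]
  cases pvSplit [] L <;> simp

-- appending c to the last reversed group = consing c to the first group, reversed
theorem pv_push_last (c : String) (S' : List (List String)) :
    (if ((S'.map List.reverse).reverse).isEmpty then (S'.map List.reverse).reverse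
     else ((S'.map List.reverse).reverse).dropLast
          ++ [((S'.map List.reverse).reverse).getLastD [] ++ [c]])
    = (((match S' with | [] => [] | g :: gs => (c :: g) :: gs : List (List String))).map
        List.reverse).reverse := by
  cases S' with
  | nil => simp
  | cons g gs => simp

-- B's reversed fold computes the grouping of the normalized stream, doubly reversed
theorem pv_b_eq (l : List String) :
    l.reverse.foldl bStep [] = ((pvSplit [] (l.filterMap pvNorm)).map List.reverse).reverse := by
  induction l with
  | nil => rfl
  | cons e rest ih =>
    have hfold : (e :: rest).reverse.foldl bStep [] = bStep (rest.reverse.foldl bStep []) e := by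
      simp [List.foldl_append]
    rw [hfold, ih, List.filterMap_cons]
    by_cases h1 : PySem.Str.isIn "cuboid(" e = true
    · have hb6 : (e == "$$") = false := pv_ne_of_isIn (by decide) h1
      have hb7 : (e == "$") = false := pv_ne_of_isIn (by decide) h1
      rw [show pvNorm e = some (pvCub e) by rw [pvNorm, if_pos h1]]
      show bStep _ e = _
      rw [bStep, pvSplit_cons_cmd _ _ (pv_cuboid_ne_sentinel e), ← pv_push_last]
      simp at h1
      simp [hb6, hb7, h1]
    · rw [Bool.not_eq_true] at h1
      by_cases hkw : (PySem.Str.isIn "attach(" e || PySem.Str.isIn "reflect(" e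
          || PySem.Str.isIn "translate(" e || PySem.Str.isIn "squeeze(" e) = true
      · have hb6 : (e == "$$") = false := by
          rcases Bool.or_eq_true_iff.mp hkw with h | h
          · rcases Bool.or_eq_true_iff.mp h with h | h
            · rcases Bool.or_eq_true_iff.mp h with h | h
              · exact pv_ne_of_isIn (by decide) h
              · exact pv_ne_of_isIn (by decide) h
            · exact pv_ne_of_isIn (by decide) h
          · exact pv_ne_of_isIn (by decide) h
        have hb7 : (e == "$") = false := by
          rcases Bool.or_eq_true_iff.mp hkw with h | h
          · rcases Bool.or_eq_true_iff.mp h with h | h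
            · rcases Bool.or_eq_true_iff.mp h with h | h
              · exact pv_ne_of_isIn (by decide) h
              · exact pv_ne_of_isIn (by decide) h
            · exact pv_ne_of_isIn (by decide) h
          · exact pv_ne_of_isIn (by decide) h
        rw [show pvNorm e = some e by
          rw [pvNorm, if_neg (by rw [h1]; exact Bool.false_ne_true), if_pos hkw]]
        show bStep _ e = _
        rw [bStep, pvSplit_cons_cmd _ _ hb6, ← pv_push_last]
        simp at h1 hkw
        simp [hb6, hb7, h1, hkw]
      · rw [Bool.not_eq_true] at hkw
        have hN : pvNorm e = (if e == "$" || e == "$$" then some "$$" else none) := by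
          rw [pvNorm, if_neg (by rw [h1]; exact Bool.false_ne_true),
            if_neg (by rw [hkw]; exact Bool.false_ne_true)]
        rw [hN]
        by_cases hs : (e == "$" || e == "$$") = true
        · rw [if_pos hs]
          show bStep _ e = _
          rw [bStep, if_pos (by rcases Bool.or_eq_true_iff.mp hs with h | h <;> simp [h]),
            pvSplit, if_pos (by decide)]
          simp
        · rw [Bool.not_eq_true] at hs
          rw [if_neg (by rw [hs]; exact Bool.false_ne_true)]
          show bStep _ e = _
          have hb6 : (e == "$$") = false := by
            cases h : (e == "$$") <;> simp_all
          have hb7 : (e == "$") = false := by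
            cases h : (e == "$") <;> simp_all
          rw [bStep]
          simp at h1 hkw
          simp [hb6, hb7, h1, hkw]

-- ===== VERDICT (by name: the statement is the Claim_ definition above) =====
theorem get_all_subprograms_spec : Claim_equal_get_all_subprograms := by
  intro el _
  show get_all_subprograms el = get_all_subprograms_alt el
  rw [get_all_subprograms, pv_go_eq, List.nil_append, get_all_subprograms_alt, pv_b_eq]
  simp [List.map_map]
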